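-- pv_equiv track=rewrite | github.com/hakloi/cplus | other/slice_1/slice_1/2/str_extension.py | remove_symmetric
-- ===== SOURCE A (Python) =====
-- def remove_symmetric(data):
--     result = []
--     n = len(data)
--     for i in range(n // 2):
--         if data[i] != data[n - 1 - i]:
--             result.append(data[i])
--             result.append(data[n - 1 - i])
--     if n % 2 != 0:
--         result.append(data[n // 2])
--     return ''.join(result)
-- ===== SOURCE B (Python) =====
-- def remove_symmetric(data):
--     n = len(data)
--
--     def pairs(lo, hi):
--         # kept mirror pairs for pair indices in [lo, hi), by divide and conquer
--         if lo >= hi: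
--             return ''
--         if lo + 1 == hi:
--             a, b = data[lo], data[n - 1 - lo]
--             return a + b if a != b else ''
--         mid = (lo + hi) // 2
--         return pairs(lo, mid) + pairs(mid, hi)
--
--     return pairs(0, n // 2) + (data[n // 2] if n % 2 else '')
-- ===== Notes on version B (the rewrite author's own statement) =====
-- stated objective: alternative
-- what changed: Replaces the linear index loop with list appends by a divide-and-conquer recursion over the pair-index interval that concatenates the kept-pair strings of the two halves, with the middle character appended for odd length.
import Mathlib
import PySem

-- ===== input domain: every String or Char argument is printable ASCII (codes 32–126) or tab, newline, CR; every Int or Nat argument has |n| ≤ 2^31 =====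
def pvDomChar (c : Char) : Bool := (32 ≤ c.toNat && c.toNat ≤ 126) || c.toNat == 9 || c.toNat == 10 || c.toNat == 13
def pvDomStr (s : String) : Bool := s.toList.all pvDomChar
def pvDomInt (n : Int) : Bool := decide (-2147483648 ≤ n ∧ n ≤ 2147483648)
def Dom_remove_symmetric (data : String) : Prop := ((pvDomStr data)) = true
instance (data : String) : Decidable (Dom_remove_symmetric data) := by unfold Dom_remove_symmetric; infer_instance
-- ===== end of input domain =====

-- B computes the kept mirror pairs by a divide-and-conquer recursion over the pair-index
-- interval instead of A's linear index loop with appends; same return value, objective: alternative.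

-- ===== PORT A =====
-- the loop over range(n//2) building `result`, then the optional middle char, then ''.join
def removeSymList (l : List Char) : List Char :=
  let n := l.length
  let result := (List.range (n / 2)).foldl
    (fun acc i =>
      if l.getD i ' ' ≠ l.getD (n - 1 - i) ' ' then
        acc ++ [l.getD i ' ', l.getD (n - 1 - i) ' ']
      else acc) []
  if n % 2 ≠ 0 then result ++ [l.getD (n / 2) ' '] else result

def remove_symmetric (data : String) : String :=
  String.mk (removeSymList data.toList)

-- ===== PORT B =====
-- pairs(lo, hi): kept mirror pairs for pair indices in [lo, hi), by divide and conquer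
def pairsDC (l : List Char) (lo hi : Nat) : List Char :=
  if lo ≥ hi then []
  else if lo + 1 = hi then
    if l.getD lo ' ' ≠ l.getD (l.length - 1 - lo) ' ' then
      [l.getD lo ' ', l.getD (l.length - 1 - lo) ' ']
    else []
  else pairsDC l lo ((lo + hi) / 2) ++ pairsDC l ((lo + hi) / 2) hi
termination_by hi - lo
decreasing_by all_goals omega

def remove_symmetric_alt (data : String) : String :=
  let l := data.toList
  let n := l.length
  String.mk (pairsDC l 0 (n / 2) ++ (if n % 2 ≠ 0 then [l.getD (n / 2) ' '] else []))

-- ===== PRECONDITION & SPEC =====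
def Spec_remove_symmetric (data : String) (out : String) : Prop := out = remove_symmetric_alt data
instance (data : String) (out : String) : Decidable (Spec_remove_symmetric data out) := by unfold Spec_remove_symmetric; infer_instance

-- ===== CLAIM (what is proved, stated in full; the proofs are below) =====
def Claim_equal_remove_symmetric : Prop := ∀ (data : String), Dom_remove_symmetric data → Spec_remove_symmetric data (remove_symmetric data)

-- ===== LEMMAS AND PROOFS =====

-- the kept-pair chunk for one pair index
def pairChunk (l : List Char) (i : Nat) : List Char :=
  if l.getD i ' ' ≠ l.getD (l.length - 1 - i) ' '
  then [l.getD i ' ', l.getD (l.length - 1 - i) ' '] else []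

-- B's divide and conquer flattens to the flatMap of pairChunk over the index interval
theorem pairsDC_eq (l : List Char) (lo hi : Nat) :
    pairsDC l lo hi = (List.range' lo (hi - lo)).flatMap (pairChunk l) := by
  rw [pairsDC]
  split
  · have : hi - lo = 0 := by omega
    simp [this]
  · split
    · have : hi - lo = 1 := by omega
      simp [this, pairChunk]
    · have h2 : ¬ lo ≥ hi := by assumption
      rw [pairsDC_eq l lo ((lo + hi) / 2), pairsDC_eq l ((lo + hi) / 2) hi]
      rw [← List.flatMap_append]
      congr 1
      have hkey : List.range' lo (((lo + hi) / 2 - lo) + (hi - (lo + hi) / 2)) =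
          List.range' lo (hi - lo) := by congr 1; omega
      rw [← hkey, ← List.range'_append_1]
      congr 2
      omega
termination_by hi - lo
decreasing_by all_goals omega

-- A's loop flattens to the same flatMap, followed by the middle element
theorem removeSymList_eq (l : List Char) :
    removeSymList l = (List.range (l.length / 2)).flatMap (pairChunk l) ++
      (if l.length % 2 ≠ 0 then [l.getD (l.length / 2) ' '] else []) := by
  unfold removeSymList
  dsimp only
  have hfun : (fun (acc : List Char) i =>
      if l.getD i ' ' ≠ l.getD (l.length - 1 - i) ' '
      then acc ++ [l.getD i ' ', l.getD (l.length - 1 - i) ' '] else acc) =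
      (fun acc i => acc ++ pairChunk l i) := by
    funext acc i; unfold pairChunk; split <;> simp
  rw [hfun, PySem.List.foldl_append_eq_flatMap]
  split <;> simp

-- ===== VERDICT (by name: the statement is the Claim_ definition above) =====
theorem remove_symmetric_spec : Claim_equal_remove_symmetric := by
  intro data _
  unfold Spec_remove_symmetric remove_symmetric remove_symmetric_alt
  dsimp only
  rw [removeSymList_eq, pairsDC_eq, List.range_eq_range']
  simp
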